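-- pv_equiv track=rewrite | github.com/hrbigelow/leetcode-solutions | non-leetcode/max_rect_under_skyline.py | maxRectUnderSkylineTest
-- ===== SOURCE A (Python) =====
-- def maxRectUnderSkylineTest(a):
--     m = 0
--     n = len(a)
--     for i, h in enumerate(a):
--         for j in range(i+1, n):
--             h2 = a[j]
--             if h > h2:
--                 m = max(m, h * (j - i))
--                 break
--
--     return m
-- ===== SOURCE B (Python) =====
-- def maxRectUnderSkylineTest(a):
--     # next-strictly-smaller-to-the-right via pointer jumping (right-to-left), then one max pass
--     n = len(a)
--     nxt = [n] * n
--     for i in range(n - 1, -1, -1):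
--         j = i + 1
--         while j < n and a[j] >= a[i]:
--             j = nxt[j]
--         nxt[i] = j
--     m = 0
--     for i in range(n):
--         if nxt[i] < n:
--             m = max(m, a[i] * (nxt[i] - i))
--     return m
-- ===== Notes on version B (the rewrite author's own statement) =====
-- stated objective: faster
-- what changed: Replaces the per-element forward scan for the first strictly smaller element to the right with a right-to-left pointer-jumping pass that fills a next-smaller array, then a single max pass.
import Mathlib
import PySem

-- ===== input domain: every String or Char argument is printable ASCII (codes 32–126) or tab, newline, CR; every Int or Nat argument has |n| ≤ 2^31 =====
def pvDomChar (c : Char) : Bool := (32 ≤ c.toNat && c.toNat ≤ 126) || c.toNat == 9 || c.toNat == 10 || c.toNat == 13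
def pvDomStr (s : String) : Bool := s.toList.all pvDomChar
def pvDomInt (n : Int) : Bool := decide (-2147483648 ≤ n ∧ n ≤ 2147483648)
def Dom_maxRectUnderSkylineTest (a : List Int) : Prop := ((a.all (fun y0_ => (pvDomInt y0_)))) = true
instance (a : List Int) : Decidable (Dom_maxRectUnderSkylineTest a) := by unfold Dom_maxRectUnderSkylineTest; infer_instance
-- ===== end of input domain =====

-- B replaces A's per-element forward scan with a right-to-left pointer-jumping pass that
-- fills a next-strictly-smaller array, then one max pass (objective: faster).

-- ===== PORT A =====
-- inner 'for j in range(i+1, n): h2 = a[j]; if h > h2: m = max(m, h*(j-i)); break'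
def innerA (a : List Int) (n : Nat) (i h m : Int) (j : Nat) : Int :=
  if j < n then
    let h2 := a.getD j 0
    if h > h2 then max m (h * ((j : Int) - i)) else innerA a n i h m (j + 1)
  else m
termination_by n - j
decreasing_by omega

def maxRectUnderSkylineTest (a : List Int) : Int :=
  (PySem.List.enumerate a 0).foldl
    (fun m p => innerA a a.length p.1 p.2 m (p.1.toNat + 1)) 0

-- ===== PORT B =====
-- 'while j < n and a[j] >= a[i]: j = nxt[j]'; ns holds nxt for indices base..n-1;
-- fuel n only makes the recursion total (j strictly increases each step, so n steps suffice)
def jumpB (a : List Int) (n : Nat) (hi : Int) (base : Nat) (ns : List Nat) : Nat → Nat → Nat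
  | j, 0 => j
  | j, fuel + 1 =>
    if j < n ∧ hi ≤ a.getD j 0 then jumpB a n hi base ns (ns.getD (j - base) n) fuel else j

-- 'for i in range(n-1, -1, -1): ... nxt[i] = j' built from the right:
-- buildNxt a n k is the nxt-array for the last k indices
def buildNxt (a : List Int) (n : Nat) : Nat → List Nat
  | 0 => []
  | k + 1 =>
    let ns := buildNxt a n k
    let i := n - (k + 1)
    jumpB a n (a.getD i 0) (i + 1) ns (i + 1) n :: ns

def maxRectUnderSkylineTest_alt (a : List Int) : Int :=
  let n := a.length
  let nxt := buildNxt a n n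
  (List.range n).foldl
    (fun m i =>
      let j := nxt.getD i n
      if j < n then max m (a.getD i 0 * ((j : Int) - (i : Int))) else m) 0

-- ===== PRECONDITION & SPEC =====
def Spec_maxRectUnderSkylineTest (a : List Int) (out : Int) : Prop := out = maxRectUnderSkylineTest_alt a
instance (a : List Int) (out : Int) : Decidable (Spec_maxRectUnderSkylineTest a out) := by unfold Spec_maxRectUnderSkylineTest; infer_instance

-- ===== CLAIM (what is proved, stated in full; the proofs are below) =====
def Claim_equal_maxRectUnderSkylineTest : Prop := ∀ (a : List Int), Dom_maxRectUnderSkylineTest a → Spec_maxRectUnderSkylineTest a (maxRectUnderSkylineTest a)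

-- ===== LEMMAS AND PROOFS =====

-- first index k ≥ j with a[k] < hi, or n if none: the specification both loops compute
def fsAux (a : List Int) (n : Nat) (hi : Int) (j : Nat) : Nat :=
  if j < n then (if a.getD j 0 < hi then j else fsAux a n hi (j + 1)) else n
termination_by n - j
decreasing_by omega

lemma fsAux_le_aux (a : List Int) (n : Nat) (hi : Int) :
    ∀ d j, n - j ≤ d → fsAux a n hi j ≤ n := by
  intro d
  induction d with
  | zero =>
    intro j hj
    rw [fsAux.eq_def]
    split
    · omega
    · omega
  | succ d ih =>
    intro j hj
    rw [fsAux.eq_def]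
    split
    · split
      · omega
      · exact ih (j + 1) (by omega)
    · omega

lemma fsAux_le (a : List Int) (n : Nat) (hi : Int) (j : Nat) : fsAux a n hi j ≤ n :=
  fsAux_le_aux a n hi (n - j) j le_rfl

lemma le_fsAux_aux (a : List Int) (n : Nat) (hi : Int) :
    ∀ d j, n - j ≤ d → j ≤ n → j ≤ fsAux a n hi j := by
  intro d
  induction d with
  | zero =>
    intro j hd hj
    rw [fsAux.eq_def]
    split
    · omega
    · omega
  | succ d ih =>
    intro j hd hj
    rw [fsAux.eq_def]
    split
    · split
      · omega
      · have := ih (j + 1) (by omega) (by omega)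
        omega
    · omega

lemma le_fsAux (a : List Int) (n : Nat) (hi : Int) (j : Nat) (hj : j ≤ n) :
    j ≤ fsAux a n hi j :=
  le_fsAux_aux a n hi (n - j) j le_rfl hj

lemma fsAux_ge_on_aux (a : List Int) (n : Nat) (hi : Int) :
    ∀ d j, n - j ≤ d → ∀ k, j ≤ k → k < fsAux a n hi j → ¬ a.getD k 0 < hi := by
  intro d
  induction d with
  | zero =>
    intro j hd k hk1 hk2
    have e : fsAux a n hi j = n := by
      rw [fsAux.eq_def]
      split
      · omega
      · rfl
    omega
  | succ d ih =>
    intro j hd k hk1 hk2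
    by_cases hjn : j < n
    · by_cases hja : a.getD j 0 < hi
      · have e : fsAux a n hi j = j := by
          rw [fsAux.eq_def, if_pos hjn, if_pos hja]
        omega
      · have e : fsAux a n hi j = fsAux a n hi (j + 1) := by
          rw [fsAux.eq_def, if_pos hjn, if_neg hja]
        rcases Nat.eq_or_lt_of_le hk1 with heq | hlt
        · subst heq; exact hja
        · exact ih (j + 1) (by omega) k hlt (by rw [← e]; exact hk2)
    · have e : fsAux a n hi j = n := by
        rw [fsAux.eq_def, if_neg hjn]
      omega

lemma fsAux_ge_on (a : List Int) (n : Nat) (hi : Int) (j k : Nat)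
    (h1 : j ≤ k) (h2 : k < fsAux a n hi j) : ¬ a.getD k 0 < hi :=
  fsAux_ge_on_aux a n hi (n - j) j le_rfl k h1 h2

lemma fsAux_stable_aux (a : List Int) (n : Nat) (hi : Int) :
    ∀ d j j', j' - j ≤ d → j ≤ j' → j' ≤ n →
      (∀ k, j ≤ k → k < j' → ¬ a.getD k 0 < hi) →
      fsAux a n hi j = fsAux a n hi j' := by
  intro d
  induction d with
  | zero =>
    intro j j' hd hle _ _
    have : j = j' := by omega
    rw [this]
  | succ d ih =>
    intro j j' hd hle hn hall
    by_cases hjj : j = j'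
    · rw [hjj]
    · have hja : ¬ a.getD j 0 < hi := hall j le_rfl (by omega)
      have e : fsAux a n hi j = fsAux a n hi (j + 1) := by
        rw [fsAux.eq_def, if_pos (show j < n by omega), if_neg hja]
      rw [e]
      exact ih (j + 1) j' (by omega) (by omega) hn (fun k h1 h2 => hall k (by omega) h2)

lemma fsAux_stable (a : List Int) (n : Nat) (hi : Int) (j j' : Nat)
    (h1 : j ≤ j') (h2 : j' ≤ n)
    (h3 : ∀ k, j ≤ k → k < j' → ¬ a.getD k 0 < hi) :
    fsAux a n hi j = fsAux a n hi j' :=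
  fsAux_stable_aux a n hi (j' - j) j j' le_rfl h1 h2 h3

lemma innerA_eq (a : List Int) (n : Nat) (i h m : Int) (j : Nat) :
    innerA a n i h m j =
      if j < n then
        (if a.getD j 0 < h then max m (h * ((j : Int) - i)) else innerA a n i h m (j + 1))
      else m := by
  rw [innerA.eq_def]

lemma innerA_eq_fsAux_aux (a : List Int) (n : Nat) (i h m : Int) :
    ∀ d j, n - j ≤ d →
      innerA a n i h m j =
        if fsAux a n h j < n then max m (h * ((fsAux a n h j : Int) - i)) else m := by
  intro d
  induction d with
  | zero =>
    intro j hd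
    have e : fsAux a n h j = n := by
      rw [fsAux.eq_def, if_neg (show ¬ j < n by omega)]
    rw [innerA_eq, e, if_neg (show ¬ j < n by omega), if_neg (lt_irrefl n)]
  | succ d ih =>
    intro j hd
    by_cases hjn : j < n
    · by_cases hja : a.getD j 0 < h
      · have e : fsAux a n h j = j := by
          rw [fsAux.eq_def, if_pos hjn, if_pos hja]
        rw [innerA_eq, e, if_pos hjn, if_pos hja, if_pos hjn]
      · have e : fsAux a n h j = fsAux a n h (j + 1) := by
          rw [fsAux.eq_def, if_pos hjn, if_neg hja]
        rw [innerA_eq, e, if_pos hjn, if_neg hja]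
        exact ih (j + 1) (by omega)
    · have e : fsAux a n h j = n := by
        rw [fsAux.eq_def, if_neg hjn]
      rw [innerA_eq, e, if_neg hjn, if_neg (lt_irrefl n)]

lemma innerA_eq_fsAux (a : List Int) (n : Nat) (i h m : Int) (j : Nat) :
    innerA a n i h m j =
      if fsAux a n h j < n then max m (h * ((fsAux a n h j : Int) - i)) else m :=
  innerA_eq_fsAux_aux a n i h m (n - j) j le_rfl

lemma jumpB_eq_fsAux (a : List Int) (n : Nat) (hi : Int) (i : Nat) (ns : List Nat)
    (hlen : ns.length = n - (i + 1))
    (hns : ∀ k, k < ns.length →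
      ns.getD k n = fsAux a n (a.getD (i + 1 + k) 0) (i + 1 + k + 1)) :
    ∀ fuel j, i + 1 ≤ j → j ≤ n → n - j ≤ fuel →
      jumpB a n hi (i + 1) ns j fuel = fsAux a n hi j := by
  intro fuel
  induction fuel with
  | zero =>
    intro j h1 h2 h3
    have e : fsAux a n hi j = n := by
      rw [fsAux.eq_def, if_neg (show ¬ j < n by omega)]
    simp only [jumpB]
    omega
  | succ fuel ih =>
    intro j h1 h2 h3
    simp only [jumpB]
    by_cases hc : j < n ∧ hi ≤ a.getD j 0
    · rw [if_pos hc]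
      obtain ⟨hjn, hha⟩ := hc
      have hk : j - (i + 1) < ns.length := by omega
      have hj' := hns (j - (i + 1)) hk
      have e1 : i + 1 + (j - (i + 1)) = j := by omega
      rw [e1] at hj'
      rw [hj']
      have h1' : j + 1 ≤ fsAux a n (a.getD j 0) (j + 1) := le_fsAux a n _ (j + 1) (by omega)
      have h2' : fsAux a n (a.getD j 0) (j + 1) ≤ n := fsAux_le a n _ (j + 1)
      rw [ih _ (by omega) h2' (by omega)]
      have hstep : fsAux a n hi j = fsAux a n hi (j + 1) := by
        rw [fsAux.eq_def, if_pos hjn, if_neg (show ¬ a.getD j 0 < hi by omega)]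
      rw [hstep]
      exact (fsAux_stable a n hi (j + 1) _ h1' h2' (fun k hk1 hk2 => by
        have := fsAux_ge_on a n (a.getD j 0) (j + 1) k hk1 hk2
        omega)).symm
    · rw [if_neg hc]
      by_cases hjn : j < n
      · have hja : a.getD j 0 < hi := by
          by_contra hcon
          exact hc ⟨hjn, by omega⟩
        rw [fsAux.eq_def, if_pos hjn, if_pos hja]
      · rw [fsAux.eq_def, if_neg hjn]
        omega

lemma buildNxt_spec (a : List Int) (n : Nat) :
    ∀ k, k ≤ n → (buildNxt a n k).length = k ∧
      ∀ k', k' < k → (buildNxt a n k).getD k' n =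
        fsAux a n (a.getD (n - k + k') 0) (n - k + k' + 1) := by
  intro k
  induction k with
  | zero =>
    intro _
    refine ⟨by simp [buildNxt], ?_⟩
    intro k' h
    omega
  | succ k ih =>
    intro hk
    obtain ⟨ihl, ihg⟩ := ih (by omega)
    have hns : ∀ k'', k'' < (buildNxt a n k).length →
        (buildNxt a n k).getD k'' n =
          fsAux a n (a.getD (n - (k + 1) + 1 + k'') 0) (n - (k + 1) + 1 + k'' + 1) := by
      intro k'' h
      have e : n - (k + 1) + 1 + k'' = n - k + k'' := by omega
      rw [e]
      exact ihg k'' (by omega)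
    have hlen : (buildNxt a n k).length = n - (n - (k + 1) + 1) := by omega
    have hjump := jumpB_eq_fsAux a n (a.getD (n - (k + 1)) 0) (n - (k + 1)) (buildNxt a n k)
      hlen hns n (n - (k + 1) + 1) le_rfl (by omega) (by omega)
    refine ⟨by simp only [buildNxt, List.length_cons]; omega, ?_⟩
    intro k' hk'
    cases k' with
    | zero =>
      simp only [buildNxt, List.getD_cons_zero]
      simpa using hjump
    | succ k'' =>
      simp only [buildNxt, List.getD_cons_succ]
      have e : n - (k + 1) + (k'' + 1) = n - k + k'' := by omega
      rw [e]
      exact ihg k'' (by omega)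

-- ===== VERDICT (by name: the statement is the Claim_ definition above) =====
theorem maxRectUnderSkylineTest_spec : Claim_equal_maxRectUnderSkylineTest := by
  intro a _
  unfold Spec_maxRectUnderSkylineTest
  unfold maxRectUnderSkylineTest maxRectUnderSkylineTest_alt
  rw [PySem.List.enumerate_eq_map_pyRange a 0, List.foldl_map, PySem.List.len_eq,
    PySem.List.pyRange_zero_nat, List.foldl_map]
  apply PySem.List.foldl_congr_mem
  intro m i hi
  have hin : i < a.length := List.mem_range.mp hi
  have hB := (buildNxt_spec a a.length a.length le_rfl).2 i hin
  have eB : a.length - a.length + i = i := by omega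
  rw [eB] at hB
  simp only [PySem.List.pyGetD_natCast, Int.toNat_natCast]
  rw [innerA_eq_fsAux, hB]
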